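-- pv_equiv track=rewrite | github.com/bubpen/codekata | 프로그래머스/0/120848. 팩토리얼/팩토리얼.py | solution
-- ===== SOURCE A (Python) =====
-- def solution(n):
--     i = 1
--     b = 1
--     while True:
--         b *= i
--         i += 1
--         if b == n or n -b*i < 0:
--             return i-1
-- ===== SOURCE B (Python) =====
-- def factorial(k):
--     return 1 if k <= 1 else k * factorial(k - 1)
--
-- def solution(n):
--     i = 1
--     while factorial(i + 1) <= n:
--         i += 1
--     return i
-- ===== Notes on version B (the rewrite author's own statement) =====
-- stated objective: idiomatic
-- what changed: Replaced A's while-True loop with a running-product accumulator and combined break test (b==n or lookahead product negative) by the direct form: increment i while factorial(i+1) <= n, recomputing the factorial via a helper, and return i.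
import Mathlib
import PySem

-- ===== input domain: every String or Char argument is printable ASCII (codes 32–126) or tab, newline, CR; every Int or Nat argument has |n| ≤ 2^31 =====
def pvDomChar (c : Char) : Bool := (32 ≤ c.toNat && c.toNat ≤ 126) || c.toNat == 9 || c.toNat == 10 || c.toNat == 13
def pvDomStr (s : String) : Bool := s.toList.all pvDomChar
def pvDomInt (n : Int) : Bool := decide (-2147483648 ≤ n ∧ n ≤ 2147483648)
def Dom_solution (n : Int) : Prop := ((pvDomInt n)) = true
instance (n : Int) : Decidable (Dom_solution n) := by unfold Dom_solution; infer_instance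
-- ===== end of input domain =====

-- B replaces A's while-True loop with accumulator and combined break test by the
-- idiomatic form: increment i while factorial(i+1) <= n (factorial recomputed by a helper).


-- ===== PORT A =====
-- A's while-True loop: state (i, b); each pass does b *= i; i += 1; then tests
-- 'b == n or n - b*i < 0'.  The positivity hypotheses record the loop invariant
-- (i, b ≥ 1) needed only for termination.
def solGoA (n i b : Int) (hi : 1 ≤ i) (hb : 1 ≤ b) : Int :=
  if h : b * i = n ∨ n - b * i * (i + 1) < 0 then (i + 1) - 1
  else solGoA n (i + 1) (b * i) (by omega) (by nlinarith)
termination_by (n + 1 - b * i).toNat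
decreasing_by
  have h1 : 1 ≤ b * i := by nlinarith
  have h3 : b * i < b * i * (i + 1) := by nlinarith
  omega

def solution (n : Int) : Int := solGoA n 1 1 (by omega) (by omega)

-- ===== PORT B =====
def factB (k : Int) : Int :=
  if k ≤ 1 then 1 else k * factB (k - 1)
termination_by k.toNat

-- needed by solGoB's termination proof (cited there by name)
theorem factB_pos (k : Int) : 1 ≤ factB k := by
  unfold factB
  split
  · omega
  · have := factB_pos (k - 1)
    nlinarith
termination_by k.toNat

theorem factB_ge_self (k : Int) : k ≤ factB k := by
  unfold factB
  split
  · omega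
  · have := factB_pos (k - 1)
    nlinarith

-- B's while loop: while factorial(i+1) <= n: i += 1
def solGoB (n i : Int) (hi : 1 ≤ i) : Int :=
  if factB (i + 1) ≤ n then solGoB n (i + 1) (by omega) else i
termination_by (n - i).toNat
decreasing_by
  have := factB_ge_self (i + 1)
  omega

def solution_alt (n : Int) : Int := solGoB n 1 (by omega)

-- ===== PRECONDITION & SPEC =====
def Spec_solution (n : Int) (out : Int) : Prop := out = solution_alt n
instance (n : Int) (out : Int) : Decidable (Spec_solution n out) := by unfold Spec_solution; infer_instance

-- ===== CLAIM (what is proved, stated in full; the proofs are below) =====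
def Claim_equal_solution : Prop := ∀ (n : Int), Dom_solution n → Spec_solution n (solution n)

-- ===== LEMMAS AND PROOFS =====

-- A's accumulator b at loop head with counter i equals factB (i-1)
theorem factB_succ (i : Int) (hi : 1 ≤ i) : factB (i - 1) * i = factB i := by
  by_cases h : i = 1
  · subst h
    have h0 : factB (1 - 1 : Int) = 1 := by rw [factB]; norm_num
    have h1 : factB (1 : Int) = 1 := by rw [factB]; norm_num
    rw [h0, h1]; ring
  · rw [show factB i = i * factB (i - 1) by rw [factB]; simp [show ¬ i ≤ 1 by omega]]
    ring

theorem go_eq (n i b : Int) (hi : 1 ≤ i) (hb : 1 ≤ b) (hbf : b = factB (i - 1)) :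
    solGoA n i b hi hb = solGoB n i hi := by
  rw [solGoA, solGoB]
  have hfs : b * i = factB i := by rw [hbf]; exact factB_succ i hi
  have hfs' : factB i * (i + 1) = factB (i + 1) := by
    have := factB_succ (i + 1) (by omega)
    simpa using this
  have hp : 1 ≤ factB i := factB_pos i
  by_cases h : factB (i + 1) ≤ n
  · -- both loops continue
    have hne : ¬ (b * i = n ∨ n - b * i * (i + 1) < 0) := by
      rw [hfs]
      rintro (he | hl)
      · nlinarith
      · nlinarith
    rw [dif_neg hne, if_pos h]
    exact go_eq n (i + 1) (b * i) (by omega) (by nlinarith) (by simpa using hfs)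
  · -- both loops stop
    have hyes : b * i = n ∨ n - b * i * (i + 1) < 0 := by
      rw [hfs]; right; nlinarith
    rw [dif_pos hyes, if_neg h]
    omega
termination_by (n - i).toNat
decreasing_by
  have := factB_ge_self (i + 1)
  omega

-- ===== VERDICT (by name: the statement is the Claim_ definition above) =====
theorem solution_spec : Claim_equal_solution := by
  intro n _
  exact go_eq n 1 1 (by omega) (by omega) (by rw [factB]; norm_num)
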